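-- pv_equiv track=rewrite | github.com/deepdoctection/deepdoctection | deepdoctection/pipe/refine.py | _missing_tile
-- ===== SOURCE A (Python) =====
-- from typing import DefaultDict, Optional, Sequence, Union
--
-- def _missing_tile(inputs: set[tuple[int, int]]) -> Optional[tuple[int, int]]:
--     min_x, min_y, max_x, max_y = (
--         min(a[0] for a in inputs),
--         min(a[1] for a in inputs),
--         max(a[0] for a in inputs),
--         max(a[1] for a in inputs),
--     )
--
--     for x in range(min_x, max_x):
--         for y in range(min_y, max_y):
--             if (x, y) not in inputs:
--                 return (x, y)
--     return None
-- ===== SOURCE B (Python) =====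
-- def _missing_tile(inputs):
--     min_x = min(a[0] for a in inputs)
--     min_y = min(a[1] for a in inputs)
--     max_x = max(a[0] for a in inputs)
--     max_y = max(a[1] for a in inputs)
--     h = max_y - min_y
--     # rank of a cell in x-major, y-minor order; cells on the open upper edges are irrelevant
--     ranks = sorted({(x - min_x) * h + (y - min_y) for (x, y) in inputs if x < max_x and y < max_y})
--     r = 0
--     for v in ranks:
--         if v == r:
--             r += 1
--         else:
--             break
--     if r < (max_x - min_x) * h:
--         return (min_x + r // h, min_y + r % h)
--     return None
-- ===== Notes on version B (the rewrite author's own statement) =====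
-- stated objective: alternative
-- what changed: Replaces A's short-circuiting nested scan over the bounding grid with a rank encoding: sort the distinct x-major ranks of the in-grid cells, find the first gap with one mex scan, and decode it by divmod, so no grid cell is ever enumerated.
import Mathlib
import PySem

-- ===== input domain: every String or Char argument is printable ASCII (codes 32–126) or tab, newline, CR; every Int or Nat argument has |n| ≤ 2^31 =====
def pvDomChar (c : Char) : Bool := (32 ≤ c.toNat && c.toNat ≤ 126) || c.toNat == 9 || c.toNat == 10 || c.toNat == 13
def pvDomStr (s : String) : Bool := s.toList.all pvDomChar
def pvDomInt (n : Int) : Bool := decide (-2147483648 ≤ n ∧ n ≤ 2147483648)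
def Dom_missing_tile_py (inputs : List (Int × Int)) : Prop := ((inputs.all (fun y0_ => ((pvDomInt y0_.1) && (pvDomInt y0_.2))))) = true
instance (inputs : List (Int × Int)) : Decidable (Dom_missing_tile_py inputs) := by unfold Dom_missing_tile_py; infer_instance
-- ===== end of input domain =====

-- B replaces A's nested scan over the bounding grid by sorting the distinct x-major ranks of the
-- in-grid cells and finding the first gap with one mex scan, then decoding it by divmod (alternative).

-- ===== PORT A =====
-- inner 'for y in range(min_y, max_y): if (x, y) not in inputs: return (x, y)'   (range is lazy: counter recursion)
def pvLoopY (inputs : List (Int × Int)) (x maxY : Int) (y : Int) : Option (Int × Int) :=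
  if _h : y < maxY then
    if (x, y) ∈ inputs then pvLoopY inputs x maxY (y + 1) else some (x, y)
  else none
termination_by (maxY - y).toNat
decreasing_by omega

-- outer 'for x in range(min_x, max_x)' with the early return threaded through
def pvLoopX (inputs : List (Int × Int)) (minY maxY maxX : Int) (x : Int) : Option (Int × Int) :=
  if _h : x < maxX then
    match pvLoopY inputs x maxY minY with
    | some p => some p
    | none => pvLoopX inputs minY maxY maxX (x + 1)
  else none
termination_by (maxX - x).toNat
decreasing_by omega

def missing_tile_py (inputs : List (Int × Int)) : Option (Int × Int) :=
  match PySem.List.min? (inputs.map (·.1)) id, PySem.List.min? (inputs.map (·.2)) id,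
        PySem.List.max? (inputs.map (·.1)) id, PySem.List.max? (inputs.map (·.2)) id with
  | some minX, some minY, some maxX, some maxY =>
      pvLoopX inputs minY maxY maxX minX
  | _, _, _, _ => none  -- min()/max() of an empty sequence raises ValueError; excluded by Pre_

-- ===== PORT B =====
-- 'r = 0; for v in ranks: if v == r: r += 1 else: break'
def pvMexLoop : List Int → Int → Int
  | [], r => r
  | v :: vs, r => if v = r then pvMexLoop vs (r + 1) else r

def missing_tile_py_alt (inputs : List (Int × Int)) : Option (Int × Int) :=
  -- each min()/max() raises ValueError on an empty sequence (none; excluded by Pre_)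
  (PySem.List.min? (inputs.map (·.1)) id).bind fun minX =>
  (PySem.List.min? (inputs.map (·.2)) id).bind fun minY =>
  (PySem.List.max? (inputs.map (·.1)) id).bind fun maxX =>
  (PySem.List.max? (inputs.map (·.2)) id).bind fun maxY =>
  let h := maxY - minY
  -- sorted({rank of in-grid cells}); the set comprehension with its filter is ofList of the filtered map
  let ranks := PySem.List.sorted (PySem.Set.ofList
      ((inputs.filter (fun p => decide (p.1 < maxX) && decide (p.2 < maxY))).map
        (fun p => (p.1 - minX) * h + (p.2 - minY)))) (fun v => v) false
  let r := pvMexLoop ranks 0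
  if r < (maxX - minX) * h then some (minX + PySem.Int.floordiv r h, minY + PySem.Int.mod r h)
  else none

-- ===== PRECONDITION & SPEC =====
-- Python A raises ValueError (min of empty sequence) on the empty set; B raises there too.
def Pre_missing_tile_py (inputs : List (Int × Int)) : Prop := inputs ≠ []
instance (inputs : List (Int × Int)) : Decidable (Pre_missing_tile_py inputs) := by unfold Pre_missing_tile_py; infer_instance
def pvWitness_missing_tile_py : (List (Int × Int)) := [(0, 0), (1, 1)]

def Spec_missing_tile_py (inputs : List (Int × Int)) (out : Option (Int × Int)) : Prop := out = missing_tile_py_alt inputs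
instance (inputs : List (Int × Int)) (out : Option (Int × Int)) : Decidable (Spec_missing_tile_py inputs out) := by unfold Spec_missing_tile_py; infer_instance

-- ===== CLAIM (what is proved, stated in full; the proofs are below) =====
def Claim_equal_missing_tile_py : Prop := ∀ (inputs : List (Int × Int)), Dom_missing_tile_py inputs → Pre_missing_tile_py inputs → Spec_missing_tile_py inputs (missing_tile_py inputs)

-- ===== LEMMAS AND PROOFS =====

-- strict lexicographic order on integer pairs
def pvLexLT (p q : Int × Int) : Prop := p.1 < q.1 ∨ (p.1 = q.1 ∧ p.2 < q.2)

-- the inner loop: first y ≥ y0 below maxY whose cell is absent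
theorem pvLoopY_char (inputs : List (Int × Int)) (x maxY : Int) :
    ∀ (n : Nat) (y : Int), (maxY - y).toNat = n →
      (∀ p, pvLoopY inputs x maxY y = some p →
        p.1 = x ∧ y ≤ p.2 ∧ p.2 < maxY ∧ p ∉ inputs ∧ ∀ z, y ≤ z → z < p.2 → (x, z) ∈ inputs)
      ∧ (pvLoopY inputs x maxY y = none → ∀ z, y ≤ z → z < maxY → (x, z) ∈ inputs) := by
  intro n
  induction n with
  | zero =>
      intro y hy
      have hnl : ¬ y < maxY := by omega
      rw [pvLoopY, dif_neg hnl]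
      exact ⟨fun p hp => by simp at hp, fun _ z hz1 hz2 => by omega⟩
  | succ n ih =>
      intro y hy
      have hlt : y < maxY := by omega
      rw [pvLoopY, dif_pos hlt]
      by_cases hmem : (x, y) ∈ inputs
      · rw [if_pos hmem]
        obtain ⟨ihs, ihn⟩ := ih (y + 1) (by omega)
        constructor
        · intro p hp
          obtain ⟨e1, e2, e3, e4, e5⟩ := ihs p hp
          refine ⟨e1, by omega, e3, e4, fun z hz1 hz2 => ?_⟩
          rcases eq_or_lt_of_le hz1 with h | h
          · rw [← h]; exact hmem
          · exact e5 z (by omega) hz2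
        · intro hp z hz1 hz2
          rcases eq_or_lt_of_le hz1 with h | h
          · rw [← h]; exact hmem
          · exact ihn hp z (by omega) hz2
      · rw [if_neg hmem]
        constructor
        · intro p hp
          injection hp with hp
          rw [← hp]
          exact ⟨rfl, le_refl _, hlt, hmem, fun z hz1 hz2 => by simp at hz1 hz2; omega⟩
        · intro hp; simp at hp
      

-- the outer loop: lexicographically-least missing cell with first coordinate ≥ x0
theorem pvLoopX_char (inputs : List (Int × Int)) (minY maxY maxX : Int) :
    ∀ (n : Nat) (x0 : Int), (maxX - x0).toNat = n →
      (∀ p, pvLoopX inputs minY maxY maxX x0 = some p →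
        (x0 ≤ p.1 ∧ p.1 < maxX ∧ minY ≤ p.2 ∧ p.2 < maxY ∧ p ∉ inputs) ∧
        ∀ q : Int × Int, x0 ≤ q.1 → q.1 < maxX → minY ≤ q.2 → q.2 < maxY → q ∉ inputs → ¬ pvLexLT q p)
      ∧ (pvLoopX inputs minY maxY maxX x0 = none →
          ∀ q : Int × Int, x0 ≤ q.1 → q.1 < maxX → minY ≤ q.2 → q.2 < maxY → q ∈ inputs) := by
  intro n
  induction n with
  | zero =>
      intro x0 hx0
      have hnl : ¬ x0 < maxX := by omega
      rw [pvLoopX, dif_neg hnl]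
      exact ⟨fun p hp => by simp at hp, fun _ q hq1 hq2 _ _ => by omega⟩
  | succ n ih =>
      intro x0 hx0
      have hlt : x0 < maxX := by omega
      rw [pvLoopX, dif_pos hlt]
      obtain ⟨hYs, hYn⟩ := pvLoopY_char inputs x0 maxY (maxY - minY).toNat minY rfl
      obtain ⟨ihs, ihn⟩ := ih (x0 + 1) (by omega)
      cases hY : pvLoopY inputs x0 maxY minY with
      | some p0 =>
          simp only
          constructor
          · intro p hp
            injection hp with hp
            rw [← hp]
            obtain ⟨e1, e2, e3, e4, e5⟩ := hYs p0 hY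
            refine ⟨⟨by omega, by omega, e2, e3, e4⟩, ?_⟩
            intro q hq1 hq2 hq3 hq4 hq5 hlex
            rcases hlex with h | ⟨h, h2⟩
            · omega
            · have hq : q = (x0, q.2) := Prod.ext (by omega) rfl
              exact hq5 (by rw [hq]; exact e5 q.2 hq3 (by omega))
          · intro hp; simp at hp
      | none =>
          simp only
          have hcol : ∀ z, minY ≤ z → z < maxY → (x0, z) ∈ inputs := hYn hY
          constructor
          · intro p hp
            obtain ⟨⟨f1, f2, f3, f4, f5⟩, fmin⟩ := ihs p hp
            refine ⟨⟨by omega, f2, f3, f4, f5⟩, ?_⟩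
            intro q hq1 hq2 hq3 hq4 hq5
            by_cases hqx : x0 + 1 ≤ q.1
            · exact fmin q hqx hq2 hq3 hq4 hq5
            · intro _
              have hq : q = (x0, q.2) := Prod.ext (by omega) rfl
              exact hq5 (by rw [hq]; exact hcol q.2 hq3 hq4)
          · intro hp q hq1 hq2 hq3 hq4
            by_cases hqx : x0 + 1 ≤ q.1
            · exact ihn hp q hqx hq2 hq3 hq4
            · have hq : q = (x0, q.2) := Prod.ext (by omega) rfl
              rw [hq]; exact hcol q.2 hq3 hq4

-- the mex scan on a strictly increasing list of values ≥ r0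
theorem pvMexLoop_spec (l : List Int) : ∀ r0 : Int, l.Pairwise (· < ·) → (∀ v ∈ l, r0 ≤ v) →
    r0 ≤ pvMexLoop l r0 ∧ pvMexLoop l r0 ∉ l ∧ ∀ s, r0 ≤ s → s < pvMexLoop l r0 → s ∈ l := by
  induction l with
  | nil =>
      intro r0 _ _
      refine ⟨le_refl _, by simp, fun s h1 h2 => ?_⟩
      simp only [pvMexLoop] at h2; omega
  | cons v vs ih =>
      intro r0 hpw hlb
      obtain ⟨hv, hvs⟩ := List.pairwise_cons.mp hpw
      by_cases hveq : v = r0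
      · simp only [pvMexLoop, if_pos hveq]
        obtain ⟨a1, a2, a3⟩ := ih (r0 + 1) hvs (fun w hw => by have := hv w hw; omega)
        refine ⟨by omega, ?_, ?_⟩
        · intro hmem
          rcases List.mem_cons.mp hmem with h | h
          · omega
          · exact a2 h
        · intro s h1 h2
          rcases eq_or_lt_of_le h1 with h | h
          · exact List.mem_cons.mpr (Or.inl (by omega))
          · exact List.mem_cons.mpr (Or.inr (a3 s (by omega) h2))
      · simp only [pvMexLoop, if_neg hveq]
        refine ⟨le_refl _, ?_, fun s h1 h2 => by omega⟩
        intro hmem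
        rcases List.mem_cons.mp hmem with h | h
        · exact hveq h.symm
        · have := hv r0 h
          have := hlb v (by simp)
          omega

-- ===== VERDICT (by name: the statement is the Claim_ definition above) =====
theorem missing_tile_py_spec : Claim_equal_missing_tile_py := by
  intro inputs _ _
  unfold Spec_missing_tile_py missing_tile_py missing_tile_py_alt
  cases h1 : PySem.List.min? (inputs.map (·.1)) id with
  | none => simp
  | some a =>
  cases h2 : PySem.List.min? (inputs.map (·.2)) id with
  | none => simp
  | some c =>
  cases h3 : PySem.List.max? (inputs.map (·.1)) id with
  | none => simp
  | some b =>
  cases h4 : PySem.List.max? (inputs.map (·.2)) id with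
  | none => simp
  | some d =>
  simp only [Option.bind_some]
  -- extremal bounds
  have hla : ∀ p ∈ inputs, a ≤ p.1 := fun p hp => by
    simpa using PySem.List.min?_isMin h1 p.1 (List.mem_map_of_mem hp)
  have hlc : ∀ p ∈ inputs, c ≤ p.2 := fun p hp => by
    simpa using PySem.List.min?_isMin h2 p.2 (List.mem_map_of_mem hp)
  have hub : ∀ p ∈ inputs, p.1 ≤ b := fun p hp => by
    simpa using PySem.List.max?_isMax h3 p.1 (List.mem_map_of_mem hp)
  have hud : ∀ p ∈ inputs, p.2 ≤ d := fun p hp => by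
    simpa using PySem.List.max?_isMax h4 p.2 (List.mem_map_of_mem hp)
  have hab : a ≤ b := by
    obtain ⟨p, hp, he⟩ := List.mem_map.mp (PySem.List.min?_mem h1)
    have := hub p hp; omega
  have hcd : c ≤ d := by
    obtain ⟨p, hp, he⟩ := List.mem_map.mp (PySem.List.min?_mem h2)
    have := hud p hp; omega
  set enc := fun p : Int × Int => (p.1 - a) * (d - c) + (p.2 - c) with henc
  set ranks := PySem.List.sorted (PySem.Set.ofList
      ((inputs.filter fun p => decide (p.1 < b) && decide (p.2 < d)).map enc)) (fun v => v) false
    with hranks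
  have hrmem : ∀ v, v ∈ ranks ↔ ∃ p, p ∈ inputs ∧ p.1 < b ∧ p.2 < d ∧ enc p = v := by
    intro v
    rw [hranks, PySem.List.mem_sorted, PySem.Set.mem_ofList]
    simp only [List.mem_map, List.mem_filter, Bool.and_eq_true, decide_eq_true_eq]
    constructor
    · rintro ⟨p, ⟨hp, hb, hd⟩, he⟩; exact ⟨p, hp, hb, hd, he⟩
    · rintro ⟨p, hp, hb, hd, he⟩; exact ⟨p, ⟨hp, hb, hd⟩, he⟩
  have hpw : ranks.Pairwise (· < ·) := PySem.List.sorted_ofList_pairwise_lt _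
  have hlb0 : ∀ v ∈ ranks, (0 : Int) ≤ v := by
    intro v hv
    obtain ⟨p, hp, hb, hd, he⟩ := (hrmem v).mp hv
    have k1 : (0 : Int) ≤ (p.1 - a) * (d - c) :=
      mul_nonneg (by have := hla p hp; omega) (by omega)
    have k2 : c ≤ p.2 := hlc p hp
    simp only [henc] at he
    omega
  obtain ⟨hr0, hrnot, hrall⟩ := pvMexLoop_spec ranks 0 hpw hlb0
  -- enc is strictly monotone for the lexicographic order on in-band cells
  have henc_lt : ∀ p q : Int × Int, c ≤ p.2 → p.2 < d → c ≤ q.2 → q.2 < d →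
      pvLexLT p q → enc p < enc q := by
    intro p q hp1 hp2 hq1 hq2 hlex
    rcases hlex with h | ⟨h, h2⟩
    · have key : (d - c) ≤ (q.1 - p.1) * (d - c) :=
        le_mul_of_one_le_left (by omega) (by omega)
      have e : enc q - enc p = (q.1 - p.1) * (d - c) + (q.2 - p.2) := by
        simp only [henc]; ring
      linarith
    · have e : enc q - enc p = q.2 - p.2 := by simp only [henc, h]; ring
      linarith
  have henc_range : ∀ p : Int × Int, a ≤ p.1 → p.1 < b → c ≤ p.2 → p.2 < d →
      0 ≤ enc p ∧ enc p < (b - a) * (d - c) := by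
    intro p g1 g2 g3 g4
    constructor
    · have := mul_nonneg (by omega : (0:Int) ≤ p.1 - a) (by omega : (0:Int) ≤ d - c)
      simp only [henc]; omega
    · have k1 : (p.1 - a) * (d - c) ≤ (b - a - 1) * (d - c) :=
        mul_le_mul_of_nonneg_right (by omega) (by omega)
      have k2 : (b - a - 1) * (d - c) + (d - c) = (b - a) * (d - c) := by ring
      simp only [henc]; linarith
  have henc_inj : ∀ p q : Int × Int, c ≤ p.2 → p.2 < d → c ≤ q.2 → q.2 < d →
      enc p = enc q → p = q := by
    intro p q hp1 hp2 hq1 hq2 he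
    by_cases h1 : p.1 = q.1
    · by_cases h2 : p.2 = q.2
      · exact Prod.ext h1 h2
      · rcases lt_or_gt_of_ne h2 with h | h
        · have := henc_lt p q hp1 hp2 hq1 hq2 (Or.inr ⟨h1, h⟩); omega
        · have := henc_lt q p hq1 hq2 hp1 hp2 (Or.inr ⟨h1.symm, h⟩); omega
    · rcases lt_or_gt_of_ne h1 with h | h
      · have := henc_lt p q hp1 hp2 hq1 hq2 (Or.inl h); omega
      · have := henc_lt q p hq1 hq2 hp1 hp2 (Or.inl h); omega
  -- any grid cell with rank below the mex is present
  have hin_of_lt : ∀ q : Int × Int, a ≤ q.1 → q.1 < b → c ≤ q.2 → q.2 < d →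
      enc q < pvMexLoop ranks 0 → q ∈ inputs := by
    intro q g1 g2 g3 g4 hlt
    have h0 : 0 ≤ enc q := (henc_range q g1 g2 g3 g4).1
    obtain ⟨p, hp, hb', hd', he⟩ := (hrmem _).mp (hrall _ h0 hlt)
    have : p = q := henc_inj p q (hlc p hp) hd' g3 g4 he
    rwa [← this]
  by_cases hcase : pvMexLoop ranks 0 < (b - a) * (d - c)
  · rw [if_pos hcase]
    have hH : 0 < d - c := by
      rcases lt_or_ge 0 (d - c) with h | h
      · exact h
      · exfalso
        have : (b - a) * (d - c) ≤ 0 := mul_nonpos_of_nonneg_of_nonpos (by omega) h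
        omega
    have hfd : PySem.Int.floordiv (pvMexLoop ranks 0) (d - c) = pvMexLoop ranks 0 / (d - c) :=
      PySem.Int.floordiv_eq_ediv_of_pos hH
    have hmd : PySem.Int.mod (pvMexLoop ranks 0) (d - c) = pvMexLoop ranks 0 % (d - c) :=
      PySem.Int.mod_eq_emod_of_pos hH
    rw [hfd, hmd]
    have hdm : (d - c) * (pvMexLoop ranks 0 / (d - c)) + pvMexLoop ranks 0 % (d - c)
        = pvMexLoop ranks 0 := Int.mul_ediv_add_emod _ _
    have hm0 : 0 ≤ pvMexLoop ranks 0 % (d - c) := Int.emod_nonneg _ (by omega)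
    have hmlt : pvMexLoop ranks 0 % (d - c) < d - c := Int.emod_lt_of_pos _ hH
    have hq0 : 0 ≤ pvMexLoop ranks 0 / (d - c) := Int.ediv_nonneg hr0 (by omega)
    have hqlt : pvMexLoop ranks 0 / (d - c) < b - a := by
      by_contra hno
      push Not at hno
      have k1 : (b - a) * (d - c) ≤ (pvMexLoop ranks 0 / (d - c)) * (d - c) :=
        mul_le_mul_of_nonneg_right hno (by omega)
      have k2 : (pvMexLoop ranks 0 / (d - c)) * (d - c)
          = (d - c) * (pvMexLoop ranks 0 / (d - c)) := mul_comm _ _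
      linarith
    set p' : Int × Int := (a + pvMexLoop ranks 0 / (d - c), c + pvMexLoop ranks 0 % (d - c))
      with hp'
    have hg1 : a ≤ p'.1 := by simp only [hp']; omega
    have hg2 : p'.1 < b := by simp only [hp']; omega
    have hg3 : c ≤ p'.2 := by simp only [hp']; omega
    have hg4 : p'.2 < d := by simp only [hp']; omega
    have hpenc : enc p' = pvMexLoop ranks 0 := by
      simp only [henc, hp']
      have : (pvMexLoop ranks 0 / (d - c)) * (d - c)
          = (d - c) * (pvMexLoop ranks 0 / (d - c)) := mul_comm _ _
      linarith
    have hpnot : p' ∉ inputs := by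
      intro hmem
      have : enc p' ∈ ranks := (hrmem _).mpr ⟨p', hmem, hg2, hg4, rfl⟩
      rw [hpenc] at this
      exact hrnot this
    cases hA : pvLoopX inputs c d b a with
    | none =>
        exact absurd ((pvLoopX_char inputs c d b (b - a).toNat a rfl).2 hA p' hg1 hg2 hg3 hg4)
          hpnot
    | some p =>
        obtain ⟨⟨g1, g2, g3, g4, g5⟩, hmin⟩ :=
          (pvLoopX_char inputs c d b (b - a).toNat a rfl).1 p hA
        have hn1 : ¬ pvLexLT p' p := hmin p' hg1 hg2 hg3 hg4 hpnot
        have hn2 : ¬ pvLexLT p p' := by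
          intro hlex
          have := henc_lt p p' g3 g4 hg3 hg4 hlex
          rw [hpenc] at this
          exact g5 (hin_of_lt p g1 g2 g3 g4 this)
        have hpp : p = p' := by
          unfold pvLexLT at hn1 hn2
          push Not at hn1 hn2
          exact Prod.ext (by omega) (by omega)
        rw [hpp]
  · rw [if_neg hcase]
    cases hA : pvLoopX inputs c d b a with
    | none => rfl
    | some p =>
        obtain ⟨⟨g1, g2, g3, g4, g5⟩, _⟩ :=
          (pvLoopX_char inputs c d b (b - a).toNat a rfl).1 p hA
        have hrange := henc_range p g1 g2 g3 g4
        exact absurd (hin_of_lt p g1 g2 g3 g4 (by omega)) g5
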